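-- pv_equiv track=rewrite | github.com/rclancyc/hermite_trust_region | hermite_tr_solver.py | get_quad_mapping
-- ===== SOURCE A (Python) =====
-- def get_quad_mapping(n):
--     """
--     :params n: (positive integer) dimension of the problem
--
--     :return rows: for a column of quad Vandermonde, tells which row component of hessian it corresponds to
--     :return cols: for a column of quad Vandermonde, tells which column component of hessian it corresponds to
--     :return mydict: for a particular component j, specificies which columns of Vandermonde it appears in
--
--     Takes dimension of problem and provides mapping to and from Hessian
--     """
--     rows = {}
--     cols = {}
--     mydict = {}
--     k = -1
--
--     # get mapping for diagonal components of Hessian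
--     for i in range(n):
--         k += 1
--         rows[k] = i
--         cols[k] = i
--         mydict[k] = [i]
--
--     # get mapping for cross terms (above diagonal)
--     for i in range(n-1):
--         for j in range(i+1,n):
--             k += 1
--             rows[k] = i
--             cols[k] = j
--             mydict[i].append(k)
--             mydict[j].append(k)
--     return rows, cols, mydict
-- ===== SOURCE B (Python) =====
-- def get_quad_mapping(n):
--     diag = [(i, i) for i in range(n)]
--     cross = [(i, j) for i in range(n) for j in range(i + 1, n)]
--     rows = {k: i for k, (i, _) in enumerate(diag + cross)}
--     cols = {k: j for k, (_, j) in enumerate(diag + cross)}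
--     # base[a]: first Vandermonde column of cross block a (closed form)
--     base = [n + a * (n - 1) - a * (a - 1) // 2 for a in range(n)]
--     mydict = {p: [p]
--                  + [base[a] + (p - a - 1) for a in range(p)]
--                  + [base[p] + (b - p - 1) for b in range(p + 1, n)]
--               for p in range(n)}
--     return rows, cols, mydict
-- ===== Notes on version B (the rewrite author's own statement) =====
-- stated objective: alternative
-- what changed: A fills rows/cols/mydict by running an incrementing column counter through two coupled loops (with interleaved appends into mydict); B instead enumerates the diagonal-plus-cross pair list to get rows/cols and builds each component's column list directly from a closed-form block-start index (a triangular-number formula for the first column of each cross block), with no counter and no appends.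
import Mathlib
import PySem

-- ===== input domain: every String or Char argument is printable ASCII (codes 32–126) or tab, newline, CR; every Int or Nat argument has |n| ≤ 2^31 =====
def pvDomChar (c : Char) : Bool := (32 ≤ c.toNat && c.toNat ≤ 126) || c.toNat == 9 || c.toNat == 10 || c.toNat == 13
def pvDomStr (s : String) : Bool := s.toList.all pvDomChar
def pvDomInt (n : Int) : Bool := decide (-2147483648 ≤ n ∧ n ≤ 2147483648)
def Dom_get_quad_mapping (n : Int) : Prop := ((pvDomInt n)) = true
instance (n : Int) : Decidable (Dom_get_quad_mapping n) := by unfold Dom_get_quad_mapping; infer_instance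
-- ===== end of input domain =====

-- B replaces A's incrementing column counter k by direct enumeration of the diagonal/cross pair list
-- and a closed-form column-index formula for the per-component dictionary (objective: alternative).

-- ===== PORT A =====
def get_quad_mapping (n : Int) : (List (Int × Int)) × (List (Int × Int)) × (List (Int × List Int)) :=
  -- rows = {}; cols = {}; mydict = {}; k = -1
  let s0 : PySem.Dict Int Int × PySem.Dict Int Int × PySem.Dict Int (List Int) × Int :=
    (PySem.Dict.empty, PySem.Dict.empty, PySem.Dict.empty, -1)
  -- for i in range(n): k += 1; rows[k] = i; cols[k] = i; mydict[k] = [i]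
  let s1 := (PySem.List.pyRange 0 n 1).foldl
    (fun s i =>
      let k := s.2.2.2 + 1
      (s.1.insert k i, s.2.1.insert k i, s.2.2.1.insert k [i], k)) s0
  -- for i in range(n-1): for j in range(i+1, n): k += 1; rows[k] = i; cols[k] = j;
  --   mydict[i].append(k); mydict[j].append(k)
  -- (the appends hit the always-present keys i, j < n, where Dict.modify is exact)
  let s2 := (PySem.List.pyRange 0 (n - 1) 1).foldl
    (fun s i =>
      (PySem.List.pyRange (i + 1) n 1).foldl
        (fun s j =>
          let k := s.2.2.2 + 1
          (s.1.insert k i, s.2.1.insert k j,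
           (s.2.2.1.modify i [] (fun l => l ++ [k])).modify j [] (fun l => l ++ [k]), k)) s) s1
  (s2.1.items, s2.2.1.items, s2.2.2.1.items)

-- ===== PORT B =====
def get_quad_mapping_alt (n : Int) : (List (Int × Int)) × (List (Int × Int)) × (List (Int × List Int)) :=
  let diag := (PySem.List.pyRange 0 n 1).map (fun i => (i, i))
  let cross := (PySem.List.pyRange 0 n 1).flatMap
    (fun i => (PySem.List.pyRange (i + 1) n 1).map (fun j => (i, j)))
  let rows := (PySem.List.enumerate (diag ++ cross)).map (fun p => (p.1, p.2.1))
  let cols := (PySem.List.enumerate (diag ++ cross)).map (fun p => (p.1, p.2.2))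
  -- base[a]: first Vandermonde column of cross block a (closed form)
  let base := (PySem.List.pyRange 0 n 1).map
    (fun a => n + a * (n - 1) - PySem.Int.floordiv (a * (a - 1)) 2)
  -- base[a], base[p]: the indices a, p are always in range here
  let mydict := (PySem.List.pyRange 0 n 1).map (fun p =>
    (p, [p] ++ (PySem.List.pyRange 0 p 1).map (fun a => PySem.List.pyGetD base a 0 + (p - a - 1))
           ++ (PySem.List.pyRange (p + 1) n 1).map (fun b => PySem.List.pyGetD base p 0 + (b - p - 1))))
  (rows, cols, mydict)

-- ===== PRECONDITION & SPEC =====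
def Spec_get_quad_mapping (n : Int) (out : (List (Int × Int)) × (List (Int × Int)) × (List (Int × List Int))) : Prop := out = get_quad_mapping_alt n
instance (n : Int) (out : (List (Int × Int)) × (List (Int × Int)) × (List (Int × List Int))) : Decidable (Spec_get_quad_mapping n out) := by unfold Spec_get_quad_mapping; infer_instance

-- ===== CLAIM (what is proved, stated in full; the proofs are below) =====
def Claim_equal_get_quad_mapping : Prop := ∀ (n : Int), Dom_get_quad_mapping n → Spec_get_quad_mapping n (get_quad_mapping n)

-- ===== LEMMAS AND PROOFS =====

-- first column index of cross block a (pvColidx n a b = pvStart n a + (b - a - 1))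
def pvStart (n a : Int) : Int := n + a * (n - 1) - PySem.Int.floordiv (a * (a - 1)) 2

-- Vandermonde column of the cross pair (a, b), a < b
def pvColidx (n a b : Int) : Int :=
  n + a * (n - 1) - PySem.Int.floordiv (a * (a - 1)) 2 + (b - a - 1)

lemma pv_start_succ (n a : Int) : pvStart n (a + 1) = pvStart n a + (n - 1 - a) := by
  obtain ⟨t, ht⟩ := Int.even_mul_pred_self a
  have h2 : a * (a - 1) = 2 * t := by omega
  have hfd : PySem.Int.floordiv (a * (a - 1)) 2 = t := by
    rw [PySem.Int.floordiv_eq_ediv_of_pos (by omega), h2, Int.mul_ediv_cancel_left _ (by omega)]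
  have h2' : (a + 1) * (a + 1 - 1) = 2 * (t + a) := by nlinarith [sq_nonneg a]
  have hfd' : PySem.Int.floordiv ((a + 1) * (a + 1 - 1)) 2 = t + a := by
    rw [PySem.Int.floordiv_eq_ediv_of_pos (by omega), h2', Int.mul_ediv_cancel_left _ (by omega)]
  unfold pvStart
  rw [hfd]
  rw [show (a + 1) * ((a + 1) - 1) = (a + 1) * (a + 1 - 1) from rfl] at hfd'
  rw [hfd']
  ring

-- a dict whose items are an explicit map over a range does not contain keys ≥ the bound
lemma pv_not_contains {ν : Type} (b k : Int) (f : Int → ν) (h : b ≤ k) :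
    (PySem.Dict.mk ((PySem.List.pyRange 0 b 1).map (fun i => (i, f i)))).contains k = false := by
  rw [PySem.Dict.contains_eq_decide_mem_keys]
  simp only [PySem.Dict.keys]
  simp [List.map_map, PySem.List.mem_pyRange_one]
  omega

lemma pv_insert_fresh {ν : Type} (d : PySem.Dict Int ν) (k : Int) (v : ν)
    (h : d.contains k = false) : d.insert k v = PySem.Dict.mk (d.items ++ [(k, v)]) := by
  apply PySem.Dict.ext
  simpa using PySem.Dict.items_insert_of_not_contains d v h

-- loop 1 of A: the diagonal entries
lemma pv_loop1 (m : Nat) :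
    (PySem.List.pyRange 0 (m : Int) 1).foldl
      (fun (s : PySem.Dict Int Int × PySem.Dict Int Int × PySem.Dict Int (List Int) × Int) i =>
        let k := s.2.2.2 + 1
        (s.1.insert k i, s.2.1.insert k i, s.2.2.1.insert k [i], k))
      (PySem.Dict.empty, PySem.Dict.empty, PySem.Dict.empty, -1)
    = (PySem.Dict.mk ((PySem.List.pyRange 0 (m : Int) 1).map (fun i => (i, i))),
       PySem.Dict.mk ((PySem.List.pyRange 0 (m : Int) 1).map (fun i => (i, i))),
       PySem.Dict.mk ((PySem.List.pyRange 0 (m : Int) 1).map (fun i => (i, [i]))),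
       (m : Int) - 1) := by
  induction m with
  | zero =>
      simp
      exact ⟨PySem.Dict.ext rfl, PySem.Dict.ext rfl⟩
  | succ m ih =>
      rw [show ((↑(m + 1) : Int)) = (m : Int) + 1 by push_cast; ring,
          PySem.List.pyRange_one_succ_right (by positivity)]
      rw [List.foldl_append, ih]
      simp only [List.foldl_cons, List.foldl_nil, List.map_append]
      have hk : ((m : Int) - 1 + 1) = (m : Int) := by omega
      simp only [hk]
      rw [pv_insert_fresh _ _ _ (pv_not_contains _ _ (fun i => i) le_rfl),
          pv_insert_fresh _ _ _ (pv_not_contains _ _ (fun i => [i]) le_rfl)]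
      simp

-- counter elimination for loop 2: fold over enumerated events instead of an in-state counter
lemma pv_counter_elim (l : List (Int × Int)) :
    ∀ (r c : PySem.Dict Int Int) (m : PySem.Dict Int (List Int)) (k0 : Int),
    l.foldl
      (fun (s : PySem.Dict Int Int × PySem.Dict Int Int × PySem.Dict Int (List Int) × Int) p =>
        let k := s.2.2.2 + 1
        (s.1.insert k p.1, s.2.1.insert k p.2,
         (s.2.2.1.modify p.1 [] (fun t => t ++ [k])).modify p.2 [] (fun t => t ++ [k]), k))
      (r, c, m, k0)
    = (((PySem.List.enumerate l (k0 + 1)).foldl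
          (fun (d : PySem.Dict Int Int) e => d.insert e.1 e.2.1) r),
       ((PySem.List.enumerate l (k0 + 1)).foldl
          (fun (d : PySem.Dict Int Int) e => d.insert e.1 e.2.2) c),
       ((PySem.List.enumerate l (k0 + 1)).foldl
          (fun (d : PySem.Dict Int (List Int)) e =>
            (d.modify e.2.1 [] (fun t => t ++ [e.1])).modify e.2.2 [] (fun t => t ++ [e.1])) m),
       k0 + l.length) := by
  induction l with
  | nil => intro r c m k0; simp [PySem.List.enumerate]
  | cons p l ih =>
      intro r c m k0
      simp only [List.foldl_cons, PySem.List.enumerate_cons]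
      rw [ih]
      simp only [List.length_cons]
      simp only [Prod.mk.injEq, true_and]
      omega

-- enumerating a mapped range
lemma pv_enum_map_range (f : Int → Int × Int) :
    ∀ (m : Nat) (c b s : Int), ((b - c).toNat = m) →
    PySem.List.enumerate ((PySem.List.pyRange c b 1).map f) s
      = (PySem.List.pyRange c b 1).map (fun j => (s + (j - c), f j)) := by
  intro m
  induction m with
  | zero =>
      intro c b s h
      rw [PySem.List.pyRange_one_eq_nil (by omega)]
      simp
  | succ m ih =>
      intro c b s h
      rw [PySem.List.pyRange_one_cons (by omega)]
      simp only [List.map_cons, PySem.List.enumerate_cons]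
      rw [ih (c + 1) b (s + 1) (by omega)]
      refine congrArg₂ _ (by simp) ?_
      apply List.map_congr_left
      intro j hj
      have : s + 1 + (j - (c + 1)) = s + (j - c) := by ring
      rw [this]

-- enumerating the cross list from block a onwards, starting at column pvStart n a
lemma pv_enum_cross (n : Int) :
    ∀ (m : Nat) (a : Int), ((n - a).toNat = m) →
    PySem.List.enumerate
        ((PySem.List.pyRange a n 1).flatMap
          (fun i => (PySem.List.pyRange (i + 1) n 1).map (fun j => (i, j)))) (pvStart n a)
      = (PySem.List.pyRange a n 1).flatMap
          (fun i => (PySem.List.pyRange (i + 1) n 1).map (fun j => (pvColidx n i j, (i, j)))) := by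
  intro m
  induction m with
  | zero =>
      intro a h
      rw [PySem.List.pyRange_one_eq_nil (by omega)]
      rfl
  | succ m ih =>
      intro a h
      rw [PySem.List.pyRange_one_cons (by omega)]
      simp only [List.flatMap_cons]
      rw [PySem.List.enumerate_append,
          pv_enum_map_range _ (n - (a + 1)).toNat (a + 1) n _ rfl]
      congr 1
      · apply List.map_congr_left
        intro j hj
        rw [PySem.List.mem_pyRange_one] at hj
        simp only [pvColidx, pvStart, Prod.mk.injEq]
        constructor
        · ring
        · trivial
      · rw [List.length_map, PySem.List.length_pyRange_one]
        rw [show pvStart n a + ((n - (a + 1)).toNat : Int) = pvStart n (a + 1) by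
              rw [pv_start_succ]; omega]
        exact ih (a + 1) (by omega)

-- extract the unique match from a flatMap of guarded singletons over a range
lemma pv_flatMap_single {α : Type} (g : Int → α) (p : Int) :
    ∀ (m : Nat) (c b : Int), ((b - c).toNat = m) →
    (PySem.List.pyRange c b 1).flatMap (fun j => if j = p then [g j] else [])
      = if c ≤ p ∧ p < b then [g p] else [] := by
  intro m
  induction m with
  | zero =>
      intro c b h
      rw [PySem.List.pyRange_one_eq_nil (by omega), if_neg (by omega)]
      rfl
  | succ m ih =>
      intro c b h
      rw [PySem.List.pyRange_one_cons (by omega)]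
      rw [List.flatMap_cons, ih (c + 1) b (by omega)]
      by_cases hc : c = p
      · subst hc
        rw [if_pos rfl, if_neg (by omega), if_pos (by omega)]
        simp
      · rw [if_neg hc]
        by_cases hp : c + 1 ≤ p ∧ p < b
        · rw [if_pos hp, if_pos (by omega)]
          simp
        · rw [if_neg hp, if_neg (by omega)]
          simp

-- a modify-fold over already-present keys leaves the key list unchanged
lemma pv_keys_pres (l : List (Int × Int)) :
    ∀ (d : PySem.Dict Int (List Int)), (∀ q ∈ l, d.contains q.1 = true) →
    (l.foldl (fun (d : PySem.Dict Int (List Int)) p => d.modify p.1 [] (fun t => t ++ [p.2])) d).keys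
      = d.keys := by
  induction l with
  | nil => intro d _; rfl
  | cons q l ih =>
      intro d hq
      simp only [List.foldl_cons]
      rw [ih _ ?later]
      · rw [PySem.Dict.keys_modify, PySem.Dict.keys_insert_of_contains _ _ (hq q (by simp))]
      case later =>
        intro q' hq'
        rw [PySem.Dict.contains_modify]
        simp [hq q' (List.mem_cons_of_mem _ hq')]

-- the columns of the Vandermonde cross part in which component p appears
lemma pv_mydict_val (n p : Int) (hp0 : 0 ≤ p) (hpn : p < n) :
    (((PySem.List.pyRange 0 n 1).flatMap
        (fun i => (PySem.List.pyRange (i + 1) n 1).flatMap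
          (fun j => [(i, pvColidx n i j), (j, pvColidx n i j)]))).filter
       (fun q => q.1 == p)).map (fun q => q.2)
    = (PySem.List.pyRange 0 p 1).map (fun a => pvColidx n a p)
      ++ (PySem.List.pyRange (p + 1) n 1).map (fun b => pvColidx n p b) := by
  rw [List.filter_flatMap]
  rw [PySem.List.pyRange_one_append 0 p n hp0 (by omega),
      PySem.List.pyRange_one_append p (p + 1) n (by omega) (by omega),
      PySem.List.pyRange_one_singleton]
  simp only [List.flatMap_append, List.flatMap_cons, List.flatMap_nil, List.append_nil]
  have hblock : ∀ i : Int, ((PySem.List.pyRange (i + 1) n 1).flatMap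
        (fun j => [(i, pvColidx n i j), (j, pvColidx n i j)])).filter (fun q => q.1 == p)
      = (PySem.List.pyRange (i + 1) n 1).flatMap
          (fun j => ((if i = p then [(i, pvColidx n i j)] else []) ++
                     (if j = p then [(j, pvColidx n i j)] else []))) := by
    intro i
    rw [List.filter_flatMap]
    apply List.flatMap_congr
    intro j _
    simp only [List.filter_cons, List.filter_nil]
    by_cases h1 : i = p <;> by_cases h2 : j = p <;> simp [h1, h2]
  have hlow : ((PySem.List.pyRange 0 p 1).flatMap
        (fun i => ((PySem.List.pyRange (i + 1) n 1).flatMap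
          (fun j => [(i, pvColidx n i j), (j, pvColidx n i j)])).filter (fun q => q.1 == p)))
      = (PySem.List.pyRange 0 p 1).map (fun i => (p, pvColidx n i p)) := by
    rw [List.map_eq_flatMap]
    apply List.flatMap_congr
    intro i hi
    rw [PySem.List.mem_pyRange_one] at hi
    rw [hblock i]
    have : ∀ j ∈ PySem.List.pyRange (i + 1) n 1,
        ((if i = p then [(i, pvColidx n i j)] else []) ++
         (if j = p then [(j, pvColidx n i j)] else []))
        = (if j = p then [(j, pvColidx n i j)] else []) := by
      intro j _
      rw [if_neg (by omega), List.nil_append]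
    rw [List.flatMap_congr this,
        pv_flatMap_single (fun j => (j, pvColidx n i j)) p (n - (i + 1)).toNat (i + 1) n rfl,
        if_pos (by omega)]
  have hmid : ((PySem.List.pyRange (p + 1) n 1).flatMap
        (fun j => [(p, pvColidx n p j), (j, pvColidx n p j)])).filter (fun q => q.1 == p)
      = (PySem.List.pyRange (p + 1) n 1).map (fun j => (p, pvColidx n p j)) := by
    rw [hblock p, List.map_eq_flatMap]
    apply List.flatMap_congr
    intro j hj
    rw [PySem.List.mem_pyRange_one] at hj
    rw [if_pos rfl, if_neg (by omega), List.append_nil]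
  have hhigh : ((PySem.List.pyRange (p + 1) n 1).flatMap
        (fun i => ((PySem.List.pyRange (i + 1) n 1).flatMap
          (fun j => [(i, pvColidx n i j), (j, pvColidx n i j)])).filter (fun q => q.1 == p)))
      = [] := by
    rw [List.flatMap_eq_nil_iff]
    intro i hi
    rw [PySem.List.mem_pyRange_one] at hi
    rw [hblock i]
    rw [List.flatMap_eq_nil_iff]
    intro j hj
    rw [PySem.List.mem_pyRange_one] at hj
    rw [if_neg (by omega), if_neg (by omega), List.append_nil]
  rw [hlow, hmid, hhigh, List.append_nil, List.map_append, List.map_map, List.map_map]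
  rfl

-- dropping the empty last outer block: range(n-1) vs range(n)
lemma pv_cp_ext {α : Type} (n : Int) (hn : 0 ≤ n) (f : Int → Int → α) :
    (PySem.List.pyRange 0 (n - 1) 1).flatMap
      (fun i => (PySem.List.pyRange (i + 1) n 1).map (f i))
    = (PySem.List.pyRange 0 n 1).flatMap
      (fun i => (PySem.List.pyRange (i + 1) n 1).map (f i)) := by
  by_cases h : n = 0
  · subst h
    rw [PySem.List.pyRange_one_eq_nil (by omega), PySem.List.pyRange_one_eq_nil (by omega)]
  · rw [PySem.List.pyRange_one_append 0 (n - 1) n (by omega) (by omega),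
        List.flatMap_append]
    have hsing := PySem.List.pyRange_one_singleton (n - 1)
    rw [show (n - 1) + 1 = n by ring] at hsing
    rw [hsing]
    simp

-- ===== VERDICT (by name: the statement is the Claim_ definition above) =====
-- the two ports at a nonnegative argument n = ↑m
lemma pv_main (m : Nat) : get_quad_mapping (m : Int) = get_quad_mapping_alt (m : Int) := by
  have hm0 : (0 : Int) ≤ (m : Int) := by positivity
  simp only [get_quad_mapping, get_quad_mapping_alt]
  rw [pv_loop1 m]
  -- nested cross loop = flat fold over the cross-pair list
  rw [show ∀ init : PySem.Dict Int Int × PySem.Dict Int Int × PySem.Dict Int (List Int) × Int,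
      (PySem.List.pyRange 0 ((m : Int) - 1) 1).foldl
        (fun s i =>
          (PySem.List.pyRange (i + 1) (m : Int) 1).foldl
            (fun s j =>
              let k := s.2.2.2 + 1
              (s.1.insert k i, s.2.1.insert k j,
               (s.2.2.1.modify i [] (fun l => l ++ [k])).modify j [] (fun l => l ++ [k]), k)) s) init
      = ((PySem.List.pyRange 0 ((m : Int) - 1) 1).flatMap
          (fun i => (PySem.List.pyRange (i + 1) (m : Int) 1).map (fun j => (i, j)))).foldl
        (fun s p =>
          let k := s.2.2.2 + 1
          (s.1.insert k p.1, s.2.1.insert k p.2,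
           (s.2.2.1.modify p.1 [] (fun l => l ++ [k])).modify p.2 [] (fun l => l ++ [k]), k)) init
      from fun init => by rw [List.foldl_flatMap]; simp only [List.foldl_map]]
  rw [pv_cp_ext (m : Int) hm0 (fun i j => (i, j))]
  rw [pv_counter_elim]
  rw [show ((m : Int) - 1 + 1) = (m : Int) by ring]
  dsimp only
  have hcross : ∀ (e : Int × Int × Int), e ∈ PySem.List.enumerate
      ((PySem.List.pyRange 0 (m : Int) 1).flatMap
        (fun i => (PySem.List.pyRange (i + 1) (m : Int) 1).map (fun j => (i, j)))) (m : Int) →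
      (m : Int) ≤ e.1 := by
    intro e he
    have h1 := List.mem_map_of_mem (f := fun x => x.1) he
    rw [PySem.List.map_fst_enumerate, PySem.List.mem_pyRange_one] at h1
    exact h1.1
  have hnod : ((PySem.List.enumerate
      ((PySem.List.pyRange 0 (m : Int) 1).flatMap
        (fun i => (PySem.List.pyRange (i + 1) (m : Int) 1).map (fun j => (i, j)))) (m : Int)).map
      (fun x => x.1)).Nodup := by
    rw [PySem.List.map_fst_enumerate]
    exact PySem.List.nodup_pyRange_one _ _
  -- B's enumeration of diag ++ cross, split and normalised
  have hdiaglen : (0 : Int) + ((PySem.List.pyRange 0 (m : Int) 1).map (fun i => (i, i))).length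
      = (m : Int) := by
    rw [List.length_map, PySem.List.length_pyRange_one]
    omega
  have henum : PySem.List.enumerate
        (((PySem.List.pyRange 0 (m : Int) 1).map (fun i => (i, i))) ++
          ((PySem.List.pyRange 0 (m : Int) 1).flatMap
            (fun i => (PySem.List.pyRange (i + 1) (m : Int) 1).map (fun j => (i, j))))) 0
      = (PySem.List.pyRange 0 (m : Int) 1).map (fun j => (j, (j, j))) ++
        PySem.List.enumerate
          ((PySem.List.pyRange 0 (m : Int) 1).flatMap
            (fun i => (PySem.List.pyRange (i + 1) (m : Int) 1).map (fun j => (i, j)))) (m : Int) := by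
    rw [PySem.List.enumerate_append, hdiaglen,
        pv_enum_map_range (fun i => (i, i)) m 0 (m : Int) 0 (by omega)]
    congr 1
    apply List.map_congr_left
    intro j _
    simp
  simp only [Prod.mk.injEq]
  refine ⟨?_, ?_, ?_⟩
  · -- rows
    rw [PySem.Dict.items_foldl_insert_fresh _ (fun e => e.1) (fun e => e.2.1) _
          (fun e he => pv_not_contains _ _ _ (hcross e he)) hnod]
    rw [henum, List.map_append, List.map_map]
    congr 1
  · -- cols
    rw [PySem.Dict.items_foldl_insert_fresh _ (fun e => e.1) (fun e => e.2.2) _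
          (fun e he => pv_not_contains _ _ _ (hcross e he)) hnod]
    rw [henum, List.map_append, List.map_map]
    congr 1
  · -- mydict
    have hstart : pvStart (m : Int) 0 = (m : Int) := by
      unfold pvStart
      rw [PySem.Int.floordiv_eq_ediv_of_pos (by omega)]
      norm_num
    have hec := pv_enum_cross (m : Int) m 0 (by omega)
    rw [hstart] at hec
    rw [hec]
    rw [show ∀ (d0 : PySem.Dict Int (List Int)) (l : List (Int × Int × Int)),
        l.foldl (fun d e => (d.modify e.2.1 [] (fun t => t ++ [e.1])).modify e.2.2 []
          (fun t => t ++ [e.1])) d0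
        = (l.flatMap (fun e => [(e.2.1, e.1), (e.2.2, e.1)])).foldl
            (fun d q => d.modify q.1 [] (fun t => t ++ [q.2])) d0
      from fun d0 l => by rw [List.foldl_flatMap]; rfl]
    have hTL : ((PySem.List.pyRange 0 (m : Int) 1).flatMap
          (fun i => (PySem.List.pyRange (i + 1) (m : Int) 1).map
            (fun j => (pvColidx (m : Int) i j, (i, j))))).flatMap
          (fun e => [(e.2.1, e.1), (e.2.2, e.1)])
        = (PySem.List.pyRange 0 (m : Int) 1).flatMap
            (fun i => (PySem.List.pyRange (i + 1) (m : Int) 1).flatMap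
              (fun j => [(i, pvColidx (m : Int) i j), (j, pvColidx (m : Int) i j)])) := by
      rw [List.flatMap_assoc]
      apply List.flatMap_congr
      intro i _
      rw [List.flatMap_map]
    rw [hTL]
    have hcont : ∀ q ∈ (PySem.List.pyRange 0 (m : Int) 1).flatMap
          (fun i => (PySem.List.pyRange (i + 1) (m : Int) 1).flatMap
            (fun j => [(i, pvColidx (m : Int) i j), (j, pvColidx (m : Int) i j)])),
        (PySem.Dict.mk ((PySem.List.pyRange 0 (m : Int) 1).map (fun i => (i, [i])))).contains q.1
          = true := by
      intro q hq
      rw [List.mem_flatMap] at hq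
      obtain ⟨i, hi, hq⟩ := hq
      rw [List.mem_flatMap] at hq
      obtain ⟨j, hj, hq⟩ := hq
      rw [PySem.List.mem_pyRange_one] at hi hj
      simp only [List.mem_cons, List.not_mem_nil, or_false] at hq
      have hq1 : q.1 = i ∨ q.1 = j := by
        rcases hq with h | h
        · left; rw [h]
        · right; rw [h]
      rw [PySem.Dict.contains_eq_decide_mem_keys]
      simp [PySem.List.mem_pyRange_one]
      omega
    have hkeys := pv_keys_pres _ _ hcont
    have hkeysM : (PySem.Dict.mk ((PySem.List.pyRange 0 (m : Int) 1).map
          (fun i => (i, [i])))).keys = PySem.List.pyRange 0 (m : Int) 1 := by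
      simp only [PySem.Dict.keys_mk, List.map_map]
      have hcomp : ((fun x : Int × List Int => x.1) ∘ fun i : Int => (i, ([i] : List Int)))
          = id := by funext i; rfl
      rw [hcomp, List.map_id]
    have hnodup : ∀ _ : Unit, ((PySem.List.pyRange 0 (m : Int) 1).flatMap
          (fun i => (PySem.List.pyRange (i + 1) (m : Int) 1).flatMap
            (fun j => [(i, pvColidx (m : Int) i j), (j, pvColidx (m : Int) i j)]))).foldl
          (fun d q => d.modify q.1 [] (fun t => t ++ [q.2]))
          (PySem.Dict.mk ((PySem.List.pyRange 0 (m : Int) 1).map (fun i => (i, [i]))))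
          |>.keys.Nodup := by
      intro _
      rw [hkeys, hkeysM]
      exact PySem.List.nodup_pyRange_one _ _
    rw [PySem.Dict.items_eq_map_keys _ (hnodup ()) []]
    rw [hkeys, hkeysM]
    apply List.map_congr_left
    intro p hp
    rw [PySem.List.mem_pyRange_one] at hp
    simp only [Prod.mk.injEq, true_and]
    rw [PySem.Dict.getD_foldl_modify_append]
    have hM : (PySem.Dict.mk ((PySem.List.pyRange 0 (m : Int) 1).map
          (fun i => (i, [i])))).getD p [] = [p] := by
      have hpmem : p ∈ PySem.List.pyRange 0 (m : Int) 1 := by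
        rw [PySem.List.mem_pyRange_one]; exact hp
      have hmem : ((p, [p]) : Int × List Int)
          ∈ (PySem.List.pyRange 0 (m : Int) 1).map (fun i => (i, [i])) :=
        List.mem_map_of_mem (f := fun i => (i, ([i] : List Int))) hpmem
      exact PySem.Dict.getD_of_mem_items _ hmem
        (by rw [hkeysM]; exact PySem.List.nodup_pyRange_one _ _) []
    rw [hM, pv_mydict_val (m : Int) p hp.1 hp.2, List.append_assoc]
    have hbasep : PySem.List.pyGetD ((PySem.List.pyRange 0 (m : Int) 1).map
          (fun a => (m : Int) + a * ((m : Int) - 1) - PySem.Int.floordiv (a * (a - 1)) 2)) p 0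
        = (m : Int) + p * ((m : Int) - 1) - PySem.Int.floordiv (p * (p - 1)) 2 :=
      PySem.List.pyGetD_map_pyRange_of_nonneg _ _ _ _ hp.1 hp.2
    simp only [hbasep]
    refine congrArg₂ _ rfl (congrArg₂ _ ?_ ?_)
    · apply List.map_congr_left
      intro a ha
      rw [PySem.List.mem_pyRange_one] at ha
      rw [PySem.List.pyGetD_map_pyRange_of_nonneg _ _ _ _ ha.1 (by omega)]
      rfl
    · rfl

theorem get_quad_mapping_spec : Claim_equal_get_quad_mapping := by
  intro n _
  unfold Spec_get_quad_mapping
  by_cases hn : 0 ≤ n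
  · obtain ⟨m, rfl⟩ := Int.eq_ofNat_of_zero_le hn
    exact pv_main m
  · simp only [get_quad_mapping, get_quad_mapping_alt,
      PySem.List.pyRange_one_eq_nil (show n ≤ 0 by omega),
      PySem.List.pyRange_one_eq_nil (show n - 1 ≤ 0 by omega)]
    rfl
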